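-- pv_equiv track=rewrite | github.com/airSipper/crypto | ceasarshifts.py | all_ceasars
-- ===== SOURCE A (Python) =====
-- def all_ceasars(text):
--     text = text.upper()
--     letters = 'ABCDEFGHIJKLMNOPQRSTUVWXYZ'
--
--     ceasars = {}
--     # loop through every possible key
--     for key in range(len(letters)):
--
--         translated = ''
--
--         # shift each char in the message
--         for symbol in text:
--             num = letters.find(symbol)
--             num = num - key
--
--             # handle wrap around
--             if num < 0:
--                 num = num + len(letters)
--
--             # add num's symbol at the end of translated
--             translated = translated + letters[num]
--             ceasars[key] = translated
--
--     return ceasars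
-- ===== SOURCE B (Python) =====
-- def all_ceasars(text):
--     text = text.upper()
--     letters = 'ABCDEFGHIJKLMNOPQRSTUVWXYZ'
--     ceasars = {}
--     # build all 26 translations in parallel, one column (character) at a time
--     for symbol in text:
--         n = letters.find(symbol)
--         for key in range(26):
--             ceasars[key] = ceasars.get(key, '') + letters[(n - key) % 26]
--     return ceasars
-- ===== Notes on version B (the rewrite author's own statement) =====
-- stated objective: alternative
-- what changed: Interchanged the loops: B iterates over the characters of the text once, computing letters.find(symbol) once per character, and grows all 26 translations in parallel column-by-column via dict.get plus letters[(n-key) % 26], instead of A's 26 full passes over the text each rebuilding one translation string and re-assigning its dict slot per character.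
import Mathlib
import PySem

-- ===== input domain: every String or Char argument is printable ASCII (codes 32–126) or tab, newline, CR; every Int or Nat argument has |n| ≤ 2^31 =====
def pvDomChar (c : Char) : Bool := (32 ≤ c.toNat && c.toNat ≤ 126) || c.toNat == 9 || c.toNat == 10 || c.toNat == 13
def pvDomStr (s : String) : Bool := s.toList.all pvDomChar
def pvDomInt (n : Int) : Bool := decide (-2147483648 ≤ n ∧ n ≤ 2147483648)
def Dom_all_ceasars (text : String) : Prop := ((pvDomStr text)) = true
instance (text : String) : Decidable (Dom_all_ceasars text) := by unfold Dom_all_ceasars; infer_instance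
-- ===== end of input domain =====

-- B interchanges A's two loops: one pass over the text, growing all 26 translations in
-- parallel (one column per character, with (n - key) % 26 doing the wrap-around) instead
-- of 26 full passes each rebuilding one translation; objective: alternative decomposition.


-- ===== PORT A =====
-- letters = 'ABCDEFGHIJKLMNOPQRSTUVWXYZ'
def pvLetters : List Char := "ABCDEFGHIJKLMNOPQRSTUVWXYZ".toList

-- the body of A's inner loop (state = (translated, ceasars))
def pvStepA (key : Int) (st : List Char × PySem.Dict Int (List Char)) (symbol : Char) :
    List Char × PySem.Dict Int (List Char) :=
  let num := PySem.Chars.find pvLetters [symbol]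
  let num := num - key
  let num := if num < 0 then num + 26 else num
  -- letters[num]: num is provably in [0, 26), so this index never raises in Python
  let translated := st.1 ++ [PySem.List.pyGetD pvLetters num 'A']
  (translated, st.2.insert key translated)

def all_ceasars (text : String) : List (Int × String) :=
  let t := PySem.Chars.upper text.toList
  -- for key in range(len(letters)) = range(26): translated = ''; for symbol in text: …
  let ceasars : PySem.Dict Int (List Char) :=
    (PySem.List.pyRange 0 26 1).foldl
      (fun d key => (t.foldl (pvStepA key) ([], d)).2) PySem.Dict.empty
  ceasars.items.map (fun p => (p.1, String.ofList p.2))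

-- ===== PORT B =====
-- the body of B's inner loop: ceasars[key] = ceasars.get(key, '') + letters[(n - key) % 26]
def pvStepB (n : Int) (d : PySem.Dict Int (List Char)) (key : Int) :
    PySem.Dict Int (List Char) :=
  d.modify key [] (· ++ [PySem.List.pyGetD pvLetters (PySem.Int.mod (n - key) 26) 'A'])

def all_ceasars_alt (text : String) : List (Int × String) :=
  let t := PySem.Chars.upper text.toList
  -- for symbol in text: n = letters.find(symbol); for key in range(26): …
  let ceasars : PySem.Dict Int (List Char) :=
    t.foldl
      (fun d symbol =>
        (PySem.List.pyRange 0 26 1).foldl (pvStepB (PySem.Chars.find pvLetters [symbol])) d)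
      PySem.Dict.empty
  ceasars.items.map (fun p => (p.1, String.ofList p.2))

-- ===== PRECONDITION & SPEC =====
def Spec_all_ceasars (text : String) (out : List (Int × String)) : Prop := out = all_ceasars_alt text
instance (text : String) (out : List (Int × String)) : Decidable (Spec_all_ceasars text out) := by unfold Spec_all_ceasars; infer_instance

-- ===== CLAIM (what is proved, stated in full; the proofs are below) =====
def Claim_equal_all_ceasars : Prop := ∀ (text : String), Dom_all_ceasars text → Spec_all_ceasars text (all_ceasars text)

-- ===== LEMMAS AND PROOFS =====

-- the character B appends for a given key and symbol
def pvImg (key : Int) (c : Char) : Char :=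
  PySem.List.pyGetD pvLetters (PySem.Int.mod (PySem.Chars.find pvLetters [c] - key) 26) 'A'

-- the character A appends for a given key and symbol
def pvImgA (key : Int) (c : Char) : Char :=
  let num := PySem.Chars.find pvLetters [c] - key
  PySem.List.pyGetD pvLetters (if num < 0 then num + 26 else num) 'A'

-- letters.find(symbol) ∈ [-1, 25]
theorem pvFindBounds (c : Char) :
    -1 ≤ PySem.Chars.find pvLetters [c] ∧ PySem.Chars.find pvLetters [c] ≤ 25 := by
  by_cases h : PySem.Chars.find pvLetters [c] = -1
  · omega
  · have hs := PySem.Chars.findFrom_natCast_spec pvLetters [c] 0 (by simp) (by simpa using h)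
    simp [PySem.Chars.findFrom_zero] at hs
    obtain ⟨h1, h2, -⟩ := hs
    have hl := h2.length_le
    rw [List.length_drop] at hl
    have h26 : pvLetters.length = 26 := by decide
    rw [h26] at hl
    simp at hl
    omega

-- A's if-wraparound equals B's % 26 for keys in range(26)
theorem pvImgA_eq (key : Int) (c : Char) (h0 : 0 ≤ key) (h1 : key < 26) :
    pvImgA key c = pvImg key c := by
  have hb := pvFindBounds c
  simp only [pvImgA, pvImg]
  rw [PySem.Int.mod_eq_emod_of_pos (by norm_num)]
  congr 1
  split_ifs with hcase <;> omega

theorem pvStepA_eq (key : Int) (st : List Char × PySem.Dict Int (List Char)) (c : Char) :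
    pvStepA key st c = (st.1 ++ [pvImgA key c], st.2.insert key (st.1 ++ [pvImgA key c])) := rfl

-- A's inner loop appends the key's images and re-assigns the key's dict slot each step;
-- the last assignment wins, so it ends as one insert of the full translated string
theorem pvInnerA (key : Int) (cs : List Char) (hne : cs ≠ []) :
    ∀ (t : List Char) (d : PySem.Dict Int (List Char)),
      cs.foldl (pvStepA key) (t, d)
        = (t ++ cs.map (pvImgA key), d.insert key (t ++ cs.map (pvImgA key))) := by
  induction cs with
  | nil => exact absurd rfl hne
  | cons c cs ih =>
    intro t d
    rw [List.foldl_cons, pvStepA_eq]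
    by_cases hcs : cs = []
    · subst hcs; simp
    · rw [ih hcs]
      simp [PySem.Dict.insert_insert_self]

-- A's outer loop: 26 inserts of fresh keys in order
theorem all_ceasars_items (cs : List Char) (hne : cs ≠ []) :
    ((PySem.List.pyRange 0 26 1).foldl
        (fun d key => (cs.foldl (pvStepA key) ([], d)).2) PySem.Dict.empty).items
      = (PySem.List.pyRange 0 26 1).map (fun k => (k, cs.map (pvImgA k))) := by
  have hbody : (fun (d : PySem.Dict Int (List Char)) key => (cs.foldl (pvStepA key) ([], d)).2)
      = fun d key => d.insert key (cs.map (pvImgA key)) := by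
    funext d key
    rw [pvInnerA key cs hne]
    simp
  rw [hbody]
  have h := PySem.Dict.items_foldl_insert_fresh (l := PySem.List.pyRange 0 26 1)
      (k := fun a => a) (v := fun a => cs.map (pvImgA a)) (d := PySem.Dict.empty)
      (by intro a _; simp) (by simp [PySem.List.nodup_pyRange_one])
  simp only [h]
  simp
  rfl

-- inserting a key absent from a literal dict appends its entry
theorem pvMkInsertFresh (acc : List (Int × List Char)) (k : Int) (v : List Char)
    (h : k ∉ acc.map Prod.fst) :
    (PySem.Dict.mk acc).insert k v = PySem.Dict.mk (acc ++ [(k, v)]) := by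
  have hc : (PySem.Dict.mk acc).contains k = false := by
    simp [PySem.Dict.contains_mk]
    intro a b hab hk
    exact h (List.mem_map.mpr ⟨(a, b), hab, hk⟩)
  apply PySem.Dict.ext
  rw [PySem.Dict.items_insert_of_not_contains _ _ hc]

-- B's inner loop over keys not yet present (the first character of the text):
-- appends one fresh single-character entry per key
theorem pvFreshLoop (f : Int → Char) (ks : List Int) :
    ∀ (acc : List (Int × List Char)),
      (∀ k ∈ ks, k ∉ acc.map Prod.fst) → ks.Nodup →
      ks.foldl (fun d k => d.modify k [] (· ++ [f k])) (PySem.Dict.mk acc)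
        = PySem.Dict.mk (acc ++ ks.map (fun k => (k, [f k]))) := by
  induction ks with
  | nil => intro acc _ _; simp
  | cons k ks ih =>
    intro acc hfresh hnd
    have hk : k ∉ acc.map Prod.fst := hfresh k (List.mem_cons_self)
    have hc : (PySem.Dict.mk acc).contains k = false := by
      simp [PySem.Dict.contains_mk]
      intro a b hab hk'
      exact hk (List.mem_map.mpr ⟨(a, b), hab, hk'⟩)
    rw [List.foldl_cons]
    have hstep : (PySem.Dict.mk acc).modify k [] (· ++ [f k])
        = PySem.Dict.mk (acc ++ [(k, [f k])]) := by
      show (PySem.Dict.mk acc).insert k ((PySem.Dict.mk acc).getD k [] ++ [f k])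
          = PySem.Dict.mk (acc ++ [(k, [f k])])
      rw [PySem.Dict.getD_of_not_contains _ _ hc]
      exact pvMkInsertFresh _ _ _ hk
    rw [hstep, ih (acc ++ [(k, [f k])])]
    · simp
    · intro k' hk'
      simp only [List.map_append, List.mem_append]
      rintro (h1 | h2)
      · exact hfresh k' (List.mem_cons_of_mem _ hk') h1
      · simp at h2
        subst h2
        exact (List.nodup_cons.mp hnd).1 hk'
    · exact (List.nodup_cons.mp hnd).2

-- first-match lookup in a literal dict whose earlier entries avoid the key
theorem pvGetMid (k : Int) (v : List Char) (l2 : List (Int × List Char)) :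
    ∀ l1 : List (Int × List Char), k ∉ l1.map Prod.fst →
      (PySem.Dict.mk (l1 ++ (k, v) :: l2)).get? k = some v := by
  intro l1
  induction l1 with
  | nil => intro _; rw [List.nil_append, PySem.Dict.get?_mk_cons]; simp
  | cons p l1 ih =>
    intro h
    rw [List.cons_append, PySem.Dict.get?_mk_cons]
    have : (p.1 == k) = false := by
      simp only [List.map_cons, List.mem_cons] at h
      simp
      exact fun he => h (Or.inl he.symm)
    rw [this]
    · exact ih (fun hm => h (by simp only [List.map_cons, List.mem_cons]; exact Or.inr hm))

-- B's inner loop over the keys already present: appends one character to every entry, in place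
theorem pvUpdLoop (f : Int → Char) (g : Int → List Char) (ks : List Int) :
    ∀ (done : List (Int × List Char)),
      (done.map Prod.fst ++ ks).Nodup →
      ks.foldl (fun d k => d.modify k [] (· ++ [f k]))
          (PySem.Dict.mk (done ++ ks.map (fun k => (k, g k))))
        = PySem.Dict.mk (done ++ ks.map (fun k => (k, g k ++ [f k]))) := by
  induction ks with
  | nil => intro done _; simp
  | cons k ks ih =>
    intro done hnd
    have hkdone : k ∉ done.map Prod.fst := by
      intro hm
      exact (List.nodup_append.mp hnd).2.2 k hm k List.mem_cons_self rfl
    have hkks : k ∉ ks := by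
      have := (List.nodup_append.mp hnd).2.1
      exact (List.nodup_cons.mp this).1
    rw [List.foldl_cons]
    have hget : (PySem.Dict.mk (done ++ (k :: ks).map (fun k => (k, g k)))).getD k [] = g k := by
      rw [List.map_cons, PySem.Dict.getD_eq_get?_getD, pvGetMid k (g k) _ done hkdone]
      rfl
    have hcont : (PySem.Dict.mk (done ++ (k :: ks).map (fun k => (k, g k)))).contains k = true := by
      simp [PySem.Dict.contains_mk]
    have hstep : (PySem.Dict.mk (done ++ (k :: ks).map (fun k => (k, g k)))).modify k [] (· ++ [f k])
        = PySem.Dict.mk ((done ++ [(k, g k ++ [f k])]) ++ ks.map (fun k => (k, g k))) := by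
      show (PySem.Dict.mk (done ++ (k :: ks).map (fun k => (k, g k)))).insert k
            ((PySem.Dict.mk (done ++ (k :: ks).map (fun k => (k, g k)))).getD k [] ++ [f k])
          = _
      rw [hget]
      apply PySem.Dict.ext
      rw [PySem.Dict.items_insert_of_contains _ _ hcont]
      show List.map _ (done ++ (k, g k) :: ks.map (fun k => (k, g k))) = _
      rw [List.map_append, List.map_cons]
      have hdone : done.map (fun p => if (p.1 == k) = true then (k, g k ++ [f k]) else p) = done := by
        conv_rhs => rw [← List.map_id done]
        apply List.map_congr_left
        intro p hp
        have : (p.1 == k) = false := by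
          simp only [beq_eq_false_iff_ne]
          intro he
          exact hkdone (List.mem_map.mpr ⟨p, hp, he⟩)
        simp [this]
      have hks : (ks.map (fun k => (k, g k))).map
            (fun p => if (p.1 == k) = true then (k, g k ++ [f k]) else p)
          = ks.map (fun k => (k, g k)) := by
        conv_rhs => rw [← List.map_id (ks.map (fun k => (k, g k)))]
        apply List.map_congr_left
        intro p hp
        obtain ⟨k', hk', rfl⟩ := List.mem_map.mp hp
        have : (k' == k) = false := by
          simp only [beq_eq_false_iff_ne]
          intro he; subst he; exact hkks hk'
        simp [this]
      rw [hdone, hks]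
      simp
    rw [hstep, ih (done ++ [(k, g k ++ [f k])]) (by
      simp only [List.map_append, List.map_cons, List.map_nil]
      have : done.map Prod.fst ++ [k] ++ ks = done.map Prod.fst ++ k :: ks := by simp
      rw [List.append_assoc]
      simpa [this] using hnd)]
    simp

-- the dictionary B has built after reading the prefix p of the text
def pvDictOf (p : List Char) : PySem.Dict Int (List Char) :=
  if p = [] then PySem.Dict.empty
  else PySem.Dict.mk ((PySem.List.pyRange 0 26 1).map (fun k => (k, p.map (pvImg k))))

theorem pvStepB_eq (c : Char) :
    pvStepB (PySem.Chars.find pvLetters [c])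
      = fun d k => d.modify k [] (· ++ [pvImg k c]) := rfl

-- one character of B's outer loop adds one column to all 26 translations
theorem pvInnerB (c : Char) (p : List Char) :
    (PySem.List.pyRange 0 26 1).foldl (pvStepB (PySem.Chars.find pvLetters [c])) (pvDictOf p)
      = pvDictOf (p ++ [c]) := by
  rw [pvStepB_eq]
  by_cases hp : p = []
  · subst hp
    have h0 : pvDictOf [] = PySem.Dict.mk [] := rfl
    rw [List.nil_append, h0,
      pvFreshLoop (fun k => pvImg k c) _ [] (by simp) (PySem.List.nodup_pyRange_one 0 26)]
    simp [pvDictOf]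
  · have h1 : pvDictOf p
        = PySem.Dict.mk ([] ++ (PySem.List.pyRange 0 26 1).map (fun k => (k, p.map (pvImg k)))) := by
      simp [pvDictOf, hp]
    rw [h1, pvUpdLoop (fun k => pvImg k c) (fun k => p.map (pvImg k)) _ []
        (by simpa using PySem.List.nodup_pyRange_one 0 26)]
    simp [pvDictOf]

theorem pvFoldB (cs : List Char) :
    ∀ (p : List Char),
      cs.foldl
        (fun d symbol =>
          (PySem.List.pyRange 0 26 1).foldl (pvStepB (PySem.Chars.find pvLetters [symbol])) d)
        (pvDictOf p)
        = pvDictOf (p ++ cs) := by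
  induction cs with
  | nil => intro p; simp
  | cons c cs ih =>
    intro p
    rw [List.foldl_cons, pvInnerB c p, ih (p ++ [c])]
    simp

theorem pvMain (cs : List Char) :
    (((PySem.List.pyRange 0 26 1).foldl
        (fun d key => (cs.foldl (pvStepA key) ([], d)).2) PySem.Dict.empty).items.map
      (fun p => (p.1, String.ofList p.2)))
    = ((cs.foldl
        (fun d symbol =>
          (PySem.List.pyRange 0 26 1).foldl (pvStepB (PySem.Chars.find pvLetters [symbol])) d)
        PySem.Dict.empty).items.map (fun p => (p.1, String.ofList p.2))) := by
  have hB : cs.foldl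
      (fun d symbol =>
        (PySem.List.pyRange 0 26 1).foldl (pvStepB (PySem.Chars.find pvLetters [symbol])) d)
      PySem.Dict.empty = pvDictOf cs := by
    have h0 : (PySem.Dict.empty : PySem.Dict Int (List Char)) = pvDictOf [] := rfl
    rw [h0, pvFoldB cs []]
    rfl
  rw [hB]
  by_cases hcs : cs = []
  · subst hcs; rfl
  · rw [all_ceasars_items cs hcs]
    have hitems : (pvDictOf cs).items
        = (PySem.List.pyRange 0 26 1).map (fun k => (k, cs.map (pvImg k))) := by
      simp [pvDictOf, hcs]
    rw [hitems, List.map_map, List.map_map]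
    apply List.map_congr_left
    intro k hk
    have hkr := (PySem.List.mem_pyRange_one).mp hk
    simp only [Function.comp]
    congr 1
    congr 1
    apply List.map_congr_left
    intro c _
    exact pvImgA_eq k c hkr.1 hkr.2

-- ===== VERDICT (by name: the statement is the Claim_ definition above) =====
theorem all_ceasars_spec : Claim_equal_all_ceasars := by
  intro text _
  unfold Spec_all_ceasars all_ceasars all_ceasars_alt
  exact pvMain (PySem.Chars.upper text.toList)
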